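-- pv_equiv track=rewrite | github.com/Soeren09/Sokoban | src/Sokobanther.py | translateCommandPreDef
-- ===== SOURCE A (Python) =====
-- def translateCommandPreDef(commands): # using predefined push length
--     prev_is_upper = False
--     prev_command = 'N'
--     translated = ""
--     for i in range(len(commands)):
--         if ( ord(commands[i]) >= 65 and ord(commands[i]) <= 90 ):
--             if ( prev_is_upper and prev_command == commands[i] ): # upper and equal to last -> for consecutive uppers add 1
--                 translated += commands[i].lower()
--                 prev_is_upper = True
--                 prev_command = commands[i]
--             else: ## Upper not equal to last -> first upper add 2
--                 translated += commands[i].lower()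
--                 translated += commands[i].lower()
--                 prev_is_upper = True
--                 prev_command = commands[i]
--             # check if current is last push -> add x (reverse)
--             if ( i+1 < len(commands) and commands[i+1] != prev_command):
--                 translated += 'x'
--         else: # not upper
--             translated += commands[i]
--             prev_is_upper = False
--             prev_command = 'N'
--     return translated
-- ===== SOURCE B (Python) =====
-- def translateCommandPreDef(commands):
--     # run-length scan: group consecutive equal chars, emit per run
--     parts = []
--     i = 0
--     n = len(commands)
--     while i < n:
--         c = commands[i]
--         j = i + 1
--         while j < n and commands[j] == c:
--             j += 1
--         if 'A' <= c <= 'Z':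
--             parts.append(c.lower() * (j - i + 1))
--             if j < n:
--                 parts.append('x')
--         else:
--             parts.append(c * (j - i))
--         i = j
--     return ''.join(parts)
-- ===== Notes on version B (the rewrite author's own statement) =====
-- stated objective: simpler
-- what changed: Replaced A's prev_is_upper/prev_command state machine (with per-index lookahead and state resets) by an explicit run-length scan: group consecutive equal characters, emit count+1 lowercase letters per uppercase run plus the reverse marker when a later run exists, and the run verbatim otherwise.
import Mathlib
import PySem

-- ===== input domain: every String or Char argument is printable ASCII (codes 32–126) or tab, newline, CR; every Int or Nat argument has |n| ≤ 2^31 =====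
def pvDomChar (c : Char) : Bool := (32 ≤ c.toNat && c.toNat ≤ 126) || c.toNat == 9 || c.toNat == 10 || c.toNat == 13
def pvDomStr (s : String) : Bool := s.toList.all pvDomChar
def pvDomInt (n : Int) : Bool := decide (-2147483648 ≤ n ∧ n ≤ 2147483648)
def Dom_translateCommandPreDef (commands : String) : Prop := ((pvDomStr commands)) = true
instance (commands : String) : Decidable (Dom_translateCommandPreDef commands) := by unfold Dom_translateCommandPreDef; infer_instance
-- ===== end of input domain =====

-- B replaces A's prev_is_upper/prev_command state machine by an explicit run-length scan; objective: simpler, same cost.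

-- Python's str.lower() on an ASCII uppercase letter: code point + 32 (only applied under the 65..90 guard)
def lowerAscii (c : Char) : Char := Char.ofNat (c.toNat + 32)

-- ===== PORT A =====
-- state machine over indices; transliterated with the current char as head and commands[i+1] as head of the rest
def aLoop : List Char → Bool → Char → List Char → List Char
  | [], _, _, acc => acc
  | c :: rest, prevU, prevC, acc =>
    if 65 ≤ c.toNat ∧ c.toNat ≤ 90 then
      let acc1 := if prevU = true ∧ prevC = c then acc ++ [lowerAscii c]
                  else acc ++ [lowerAscii c, lowerAscii c]
      let acc2 := match rest with
        | d :: _ => if d ≠ c then acc1 ++ ['x'] else acc1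
        | [] => acc1
      aLoop rest true c acc2
    else
      aLoop rest false 'N' (acc ++ [c])

def translateCommandPreDef (commands : String) : String :=
  String.mk (aLoop commands.toList false 'N' [])

-- ===== PORT B =====
-- length of the leading run of chars equal to c (Source B's inner `while j < n and commands[j] == c`)
def spanEq (c : Char) : List Char → Nat
  | [] => 0
  | d :: rest => if d = c then spanEq c rest + 1 else 0

def bGo : List Char → List Char
  | c :: rest =>
    let k := spanEq c rest
    let tail := rest.drop k
    (if 65 ≤ c.toNat ∧ c.toNat ≤ 90 then
       List.replicate (k + 2) (lowerAscii c) ++ (if tail = [] then [] else ['x'])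
     else
       List.replicate (k + 1) c) ++ bGo tail
  | [] => []
termination_by l => l.length
decreasing_by simp [List.length_drop]

def translateCommandPreDef_alt (commands : String) : String :=
  String.mk (bGo commands.toList)

-- ===== PRECONDITION & SPEC =====
def Spec_translateCommandPreDef (commands : String) (out : String) : Prop := out = translateCommandPreDef_alt commands
instance (commands : String) (out : String) : Decidable (Spec_translateCommandPreDef commands out) := by unfold Spec_translateCommandPreDef; infer_instance

-- ===== CLAIM (what is proved, stated in full; the proofs are below) =====
def Claim_equal_translateCommandPreDef : Prop := ∀ (commands : String), Dom_translateCommandPreDef commands → Spec_translateCommandPreDef commands (translateCommandPreDef commands)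

-- ===== LEMMAS AND PROOFS =====

-- the incoming state does not match the head char (A then takes the "first upper" branch)
def Fresh (u : Bool) (p : Char) : List Char → Prop
  | [] => True
  | d :: _ => u = false ∨ p ≠ d

-- the list does not start with c
def FreshT (c : Char) : List Char → Prop
  | [] => True
  | d :: _ => d ≠ c

theorem aLoop_acc (l : List Char) : ∀ u p acc, aLoop l u p acc = acc ++ aLoop l u p [] := by
  induction l with
  | nil => intro u p acc; simp [aLoop]
  | cons c rest ih =>
    intro u p acc
    by_cases h : 65 ≤ c.toNat ∧ c.toNat ≤ 90
    · simp only [aLoop, if_pos h]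
      by_cases hm : u = true ∧ p = c
      · cases rest with
        | nil =>
          simp only [if_pos hm]
          rw [ih]; conv_rhs => rw [ih]
          simp
        | cons d t =>
          simp only [if_pos hm]
          by_cases hd : d ≠ c
          · simp only [if_pos hd]
            rw [ih]; conv_rhs => rw [ih]
            simp
          · simp only [if_neg hd]
            rw [ih]; conv_rhs => rw [ih]
            simp
      · cases rest with
        | nil =>
          simp only [if_neg hm]
          rw [ih]; conv_rhs => rw [ih]
          simp
        | cons d t =>
          simp only [if_neg hm]
          by_cases hd : d ≠ c
          · simp only [if_pos hd]
            rw [ih]; conv_rhs => rw [ih]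
            simp
          · simp only [if_neg hd]
            rw [ih]; conv_rhs => rw [ih]
            simp
    · simp only [aLoop, if_neg h]
      rw [ih]; conv_rhs => rw [ih]
      simp

theorem span_decomp (c : Char) (l : List Char) :
    List.replicate (spanEq c l) c ++ l.drop (spanEq c l) = l := by
  induction l with
  | nil => simp [spanEq]
  | cons d t ih =>
    by_cases hd : d = c
    · subst hd; simp [spanEq, List.replicate_succ, ih]
    · simp [spanEq, hd]

theorem span_fresh (c : Char) (l : List Char) : FreshT c (l.drop (spanEq c l)) := by
  induction l with
  | nil => simp [spanEq, FreshT]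
  | cons d t ih =>
    by_cases hd : d = c
    · subst hd; simpa [spanEq] using ih
    · simpa [spanEq, hd, FreshT] using hd

-- peeling one non-uppercase char off the front of B's run-length scan
theorem bGo_cons (c : Char) (rest : List Char) (h : ¬ (65 ≤ c.toNat ∧ c.toNat ≤ 90)) :
    bGo (c :: rest) = c :: bGo rest := by
  cases rest with
  | nil => simp [bGo, spanEq, h]
  | cons d t =>
    by_cases hd : d = c
    · subst hd
      rw [bGo]
      conv_rhs => rw [bGo]
      simp [spanEq, h, List.replicate_succ]
    · rw [bGo]
      simp [spanEq, hd, h]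

-- the 'x' marker A appends after an uppercase char: commands[i+1] exists and differs
def xmark (c : Char) : List Char → List Char
  | d :: _ => if d ≠ c then ['x'] else []
  | [] => []

theorem aLoop_step_fresh (c : Char) (rest : List Char) (u : Bool) (p : Char)
    (h : 65 ≤ c.toNat ∧ c.toNat ≤ 90) (hm : ¬ (u = true ∧ p = c)) :
    aLoop (c :: rest) u p [] =
      ([lowerAscii c, lowerAscii c] ++ xmark c rest) ++ aLoop rest true c [] := by
  simp only [aLoop, if_pos h, if_neg hm]
  cases rest with
  | nil => rw [aLoop_acc]; simp [xmark]
  | cons d t =>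
    by_cases hd : d ≠ c
    · simp only [if_pos hd]; rw [aLoop_acc]; simp [xmark, hd]
    · simp only [if_neg hd]; rw [aLoop_acc]; simp [xmark, hd]

theorem aLoop_step_match (c : Char) (rest : List Char)
    (h : 65 ≤ c.toNat ∧ c.toNat ≤ 90) :
    aLoop (c :: rest) true c [] =
      ([lowerAscii c] ++ xmark c rest) ++ aLoop rest true c [] := by
  have hc : (true = true ∧ c = c) := ⟨rfl, rfl⟩
  simp only [aLoop, if_pos h, if_pos hc]
  cases rest with
  | nil => rw [aLoop_acc]; simp [xmark]
  | cons d t =>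
    by_cases hd : d ≠ c
    · simp only [if_pos hd]; rw [aLoop_acc]; simp [xmark, hd]
    · simp only [if_neg hd]; rw [aLoop_acc]; simp [xmark, hd]

theorem xmark_span (c : Char) (rest : List Char) :
    xmark c rest = if spanEq c rest = 0 ∧ rest.drop (spanEq c rest) ≠ [] then ['x'] else [] := by
  cases rest with
  | nil => simp [xmark, spanEq]
  | cons d t =>
    by_cases hd : d = c
    · subst hd; simp [xmark, spanEq]
    · simp [xmark, spanEq, hd]

theorem xmark_run (c : Char) (m : Nat) (tail : List Char) (hft : FreshT c tail) :
    xmark c (List.replicate m c ++ tail) = if m = 0 ∧ tail ≠ [] then ['x'] else [] := by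
  cases m with
  | zero =>
    cases tail with
    | nil => simp [xmark]
    | cons d t => simp_all [xmark, FreshT]
  | succ m' => simp [List.replicate_succ, xmark]

-- main invariant: A's loop from a fresh state equals B; and A's loop inside an uppercase run
theorem main_aux : ∀ n l, List.length l ≤ n →
    ((∀ u p, Fresh u p l → aLoop l u p [] = bGo l) ∧
     (∀ c k tail, (65 ≤ c.toNat ∧ c.toNat ≤ 90) → l = List.replicate k c ++ tail → FreshT c tail →
        aLoop l true c [] = List.replicate k (lowerAscii c) ++
          (if k ≠ 0 ∧ tail ≠ [] then ['x'] else []) ++ bGo tail)) := by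
  intro n
  induction n with
  | zero =>
    intro l hl
    have hnil : l = [] := List.eq_nil_of_length_eq_zero (Nat.le_zero.mp hl)
    subst hnil
    constructor
    · intro u p _; simp [aLoop, bGo]
    · intro c k tail _ hrep _
      have hk0 : k = 0 := by
        cases k with
        | zero => rfl
        | succ m => simp [List.replicate_succ] at hrep
      subst hk0
      have ht0 : tail = [] := by simpa using hrep.symm
      subst ht0
      simp [aLoop, bGo]
  | succ n ih =>
    intro l hl
    have hQ : ∀ u p, Fresh u p l → aLoop l u p [] = bGo l := by
      cases l with
      | nil => intro u p _; simp [aLoop, bGo]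
      | cons c rest =>
        intro u p hf
        have hrest : rest.length ≤ n := by simpa using Nat.lt_succ_iff.mp (by simpa using hl)
        by_cases h : 65 ≤ c.toNat ∧ c.toNat ≤ 90
        · -- A takes the "first upper" branch since the state is fresh
          have hm : ¬ (u = true ∧ p = c) := by
            rcases hf with hu | hp
            · intro hh; rw [hu] at hh; exact Bool.false_ne_true hh.1
            · intro hh; exact hp hh.2
          have hrun := (ih rest hrest).2 c (spanEq c rest) (rest.drop (spanEq c rest)) h
            (span_decomp c rest).symm (span_fresh c rest)
          rw [aLoop_step_fresh c rest u p h hm, hrun, xmark_span]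
          conv_rhs => rw [bGo]
          simp only [if_pos h]
          by_cases ht : rest.drop (spanEq c rest) = []
          · simp [ht, show spanEq c rest + 2 = 2 + spanEq c rest by omega, List.replicate_add]
          · by_cases hk0 : spanEq c rest = 0
            · simp [ht, hk0]
            · simp [ht, hk0, show spanEq c rest + 2 = 2 + spanEq c rest by omega,
                List.replicate_add]
        · -- non-uppercase: emit c, reset state
          simp only [aLoop, if_neg h]
          rw [aLoop_acc]
          have := (ih rest hrest).1 false 'N' (by cases rest <;> simp [Fresh])
          rw [this, bGo_cons c rest h]
          simp
    refine ⟨hQ, ?_⟩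
    intro c k tail hup hrep hft
    cases k with
    | zero =>
      -- run exhausted: the state is fresh for tail
      have hl' : l = tail := by simpa using hrep
      subst hl'
      have hfr : Fresh true c l := by
        cases l with
        | nil => trivial
        | cons d t =>
          have hd : d ≠ c := by simpa [FreshT] using hft
          exact Or.inr hd.symm
      simp [hQ true c hfr]
    | succ m =>
      -- head of the run: matched state, emit one lowercase
      have hl' : l = c :: (List.replicate m c ++ tail) := by
        rw [hrep, List.replicate_succ]; rfl
      subst hl'
      have hrest : (List.replicate m c ++ tail).length ≤ n := by
        simp at hl ⊢; omega
      have hrun := (ih _ hrest).2 c m tail hup rfl hft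
      rw [aLoop_step_match c _ hup, hrun, xmark_run c m tail hft]
      by_cases ht : tail = []
      · simp [ht, List.replicate_succ]
      · by_cases hm0 : m = 0
        · subst hm0; simp [ht, List.replicate_succ]
        · simp [ht, hm0, List.replicate_succ]

-- ===== VERDICT (by name: the statement is the Claim_ definition above) =====
theorem translateCommandPreDef_spec : Claim_equal_translateCommandPreDef := by
  intro commands _
  unfold Spec_translateCommandPreDef translateCommandPreDef translateCommandPreDef_alt
  have := (main_aux commands.toList.length commands.toList le_rfl).1 false 'N'
    (by cases commands.toList <;> simp [Fresh])
  rw [this]
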